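-- pv_equiv track=rewrite | github.com/grill-lab/OAT | neural_functionalities/phase_intent_classifier/utils/model_utils.py | get_turn_counts
-- ===== SOURCE A (Python) =====
-- def get_turn_counts(samples):
--     counts = {}
--     for turn in samples:
--         id = turn['q_id'].split('_')[1]
--         if id in counts:
--             counts[id] += 1
--         else:
--             counts[id] = 1
--     return counts
-- ===== SOURCE B (Python) =====
-- def get_turn_counts(samples):
--     keys = [turn['q_id'].split('_')[1] for turn in samples]
--
--     def count(ks):
--         if len(ks) <= 1:
--             return {ks[0]: 1} if ks else {}
--         mid = len(ks) // 2
--         counts = count(ks[:mid])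
--         for k, v in count(ks[mid:]).items():
--             counts[k] = counts.get(k, 0) + v
--         return counts
--
--     return count(keys)
-- ===== Notes on version B (the rewrite author's own statement) =====
-- stated objective: alternative
-- what changed: Replaces the single-pass dict accumulation with a divide-and-conquer count: extract all keys first, recursively count each half of the key list and merge the two sub-dicts by adding counts.
import Mathlib
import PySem

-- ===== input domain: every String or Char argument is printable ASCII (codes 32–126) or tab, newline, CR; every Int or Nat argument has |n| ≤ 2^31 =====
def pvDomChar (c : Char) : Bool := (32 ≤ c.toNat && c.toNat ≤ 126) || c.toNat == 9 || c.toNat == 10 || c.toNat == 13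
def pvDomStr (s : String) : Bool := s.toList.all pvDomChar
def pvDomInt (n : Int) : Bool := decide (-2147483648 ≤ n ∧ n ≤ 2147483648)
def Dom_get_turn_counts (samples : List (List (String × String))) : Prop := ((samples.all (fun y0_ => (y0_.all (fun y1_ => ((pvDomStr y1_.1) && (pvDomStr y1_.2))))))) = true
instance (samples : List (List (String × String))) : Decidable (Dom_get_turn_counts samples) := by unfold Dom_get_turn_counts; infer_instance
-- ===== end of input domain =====

-- B replaces A's single-pass dict accumulation by a divide-and-conquer count: extract the key
-- list, recursively count each half and merge the sub-dicts by adding counts (alternative, not claimed faster).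

-- ===== PORT A =====
-- turn['q_id'].split('_')[1]; the .getD defaults are never used under Pre_get_turn_counts
def pvAKey (turn : List (String × String)) : String :=
  (PySem.List.pyGet? ((PySem.Str.split? (((PySem.Dict.mk turn).get? "q_id").getD "") "_").getD []) 1).getD ""

def get_turn_counts (samples : List (List (String × String))) : List (String × Int) :=
  (samples.foldl
    (fun counts turn =>
      let id := pvAKey turn
      if counts.contains id then counts.insert id (counts.getD id 0 + 1)
      else counts.insert id 1)
    (PySem.Dict.empty : PySem.Dict String Int)).items

-- ===== PORT B =====
def pvBKey (turn : List (String × String)) : String :=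
  (PySem.List.pyGet? ((PySem.Str.split? (((PySem.Dict.mk turn).get? "q_id").getD "") "_").getD []) 1).getD ""

-- count(ks): halve on ks.length // 2; ks[:mid] / ks[mid:] are List.take / List.drop (exact:
-- 0 ≤ mid ≤ len); the merge loop 'counts[k] = counts.get(k, 0) + v' is the foldl over items.
def pvCount (ks : List String) : PySem.Dict String Int :=
  if _h : ks.length ≤ 1 then
    match ks with
    | [] => PySem.Dict.empty
    | k :: _ => PySem.Dict.empty.insert k 1
  else
    let mid := ks.length / 2
    let counts := pvCount (ks.take mid)
    (pvCount (ks.drop mid)).items.foldl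
      (fun d p => d.insert p.1 (d.getD p.1 0 + p.2)) counts
termination_by ks.length
decreasing_by
  · simp only [List.length_take]; omega
  · simp only [List.length_drop]; omega

def get_turn_counts_alt (samples : List (List (String × String))) : List (String × Int) :=
  (pvCount (samples.map pvBKey)).items

-- ===== PRECONDITION & SPEC =====
-- Pre_ excludes exactly the inputs where Python A raises: a turn without a 'q_id' key (KeyError)
-- or whose q_id contains no '_' (IndexError on split('_')[1]).
def Pre_get_turn_counts (samples : List (List (String × String))) : Prop :=
  ∀ turn ∈ samples, ((PySem.Dict.mk turn).get? "q_id").any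
    (fun v => 2 ≤ ((PySem.Str.split? v "_").getD []).length) = true
instance (samples : List (List (String × String))) : Decidable (Pre_get_turn_counts samples) := by
  unfold Pre_get_turn_counts; infer_instance

def pvWitness_get_turn_counts : (List (List (String × String))) := [[("q_id", "train_7")], [("q_id", "dev_7")]]

def Spec_get_turn_counts (samples : List (List (String × String))) (out : List (String × Int)) : Prop := out = get_turn_counts_alt samples
instance (samples : List (List (String × String))) (out : List (String × Int)) : Decidable (Spec_get_turn_counts samples out) := by unfold Spec_get_turn_counts; infer_instance

-- ===== CLAIM (what is proved, stated in full; the proofs are below) =====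
def Claim_equal_get_turn_counts : Prop := ∀ (samples : List (List (String × String))), Dom_get_turn_counts samples → Pre_get_turn_counts samples → Spec_get_turn_counts samples (get_turn_counts samples)

-- ===== LEMMAS AND PROOFS =====

-- A's branchy update is exactly the Counter update step
theorem pvStep_eq (counts : PySem.Dict String Int) (id : String) :
    (if counts.contains id then counts.insert id (counts.getD id 0 + 1)
     else counts.insert id 1) = counts.insert id (counts.getD id 0 + 1) := by
  by_cases h : counts.contains id = true
  · simp [h]
  · have h' : counts.contains id = false := by simpa using h
    have h0 : counts.getD id 0 = 0 := PySem.Dict.getD_of_not_contains counts 0 h'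
    simp [h', h0]

-- helper lookups on literal association lists used by the merge characterisation
theorem pvMkCons_getD (k : String) (v : Int) (L : List (String × Int)) (x : String) :
    (PySem.Dict.mk ((k, v) :: L)).getD x 0 = if k == x then v else (PySem.Dict.mk L).getD x 0 := by
  simp only [PySem.Dict.getD_eq_get?_getD, PySem.Dict.get?_mk_cons]
  split_ifs <;> rfl

theorem pvMk_getD_of_not_mem (L : List (String × Int)) (k : String) (hk : k ∉ L.map Prod.fst) :
    (PySem.Dict.mk L).getD k 0 = 0 := by
  rw [PySem.Dict.getD_eq_get?_getD,
    (PySem.Dict.get?_eq_none_iff_not_mem_keys _ _).mpr (by simpa [PySem.Dict.keys] using hk)]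
  rfl

-- B's merge loop, characterised: existing keys are bumped in place, new keys append in L's order
theorem pvMerge_items (L : List (String × Int)) (d : PySem.Dict String Int)
    (hL : (L.map Prod.fst).Nodup) (hd : d.keys.Nodup) :
    L.foldl (fun d p => d.insert p.1 (d.getD p.1 0 + p.2)) d =
      PySem.Dict.mk
        (d.items.map (fun q => (q.1, q.2 + (PySem.Dict.mk L).getD q.1 0))
          ++ L.filter (fun p => !(d.contains p.1))) := by
  induction L generalizing d with
  | nil =>
    simp [PySem.Dict.getD_eq_get?_getD, PySem.Dict.get?]
  | cons p L ih =>
    obtain ⟨k, v⟩ := p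
    simp only [List.map_cons, List.nodup_cons] at hL
    obtain ⟨hk, hL'⟩ := hL
    rw [List.foldl_cons]
    rw [ih _ hL' (PySem.Dict.nodup_keys_insert _ _ _ hd)]
    have hfilt : ∀ w : Int, L.filter (fun p => !((d.insert k w).contains p.1))
        = L.filter (fun p => !(d.contains p.1)) := by
      intro w
      apply List.filter_congr
      intro p hp
      have hne : p.1 ≠ k := fun he => hk (he ▸ List.mem_map_of_mem hp)
      simp [PySem.Dict.contains_insert, hne]
    by_cases hc : d.contains k = true
    · apply PySem.Dict.ext
      show _ ++ _ = _ ++ _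
      rw [PySem.Dict.items_insert_of_contains _ _ hc, hfilt,
        List.filter_cons_of_neg (by simp [hc]), List.map_map]
      congr 1
      apply List.map_congr_left
      intro q hq
      by_cases hqk : q.1 = k
      · have hq2 : q.2 = d.getD k 0 := by
          have := PySem.Dict.getD_of_mem_items d (k := q.1) (v := q.2) (by simpa using hq) hd 0
          rw [hqk] at this; exact this.symm
        simp only [Function.comp_apply, hqk, beq_self_eq_true, if_pos, pvMkCons_getD,
          pvMk_getD_of_not_mem L k hk, hq2]
        simp
      · simp [Function.comp, hqk, pvMkCons_getD, Ne.symm hqk]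
    · have hc' : d.contains k = false := by simpa using hc
      have h0 : d.getD k 0 = 0 := PySem.Dict.getD_of_not_contains d 0 hc'
      have hknd : ∀ q ∈ d.items, q.1 ≠ k := by
        intro q hq he
        have hm : d.contains k = true :=
          (PySem.Dict.contains_iff_mem_keys _ _).mpr (he ▸ PySem.Dict.mem_keys_of_mem_items d hq)
        rw [hm] at hc'; exact Bool.noConfusion hc'
      apply PySem.Dict.ext
      show _ ++ _ = _ ++ _
      rw [PySem.Dict.items_insert_of_not_contains _ _ hc', hfilt,
        List.filter_cons_of_pos (by simp [hc']), h0, List.map_append]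
      have hmap : List.map (fun q => (q.1, q.2 + (PySem.Dict.mk ((k, v) :: L)).getD q.1 0)) d.items
          = List.map (fun q => (q.1, q.2 + (PySem.Dict.mk L).getD q.1 0)) d.items := by
        apply List.map_congr_left
        intro q hq
        simp [pvMkCons_getD, Ne.symm (hknd q hq)]
      rw [hmap, List.append_assoc]
      simp [pvMk_getD_of_not_mem L k hk]

-- merging Counter(b) into Counter(a) is Counter(a ++ b)
theorem pvMerge_counter (a b : List String) :
    (PySem.Dict.counter b).items.foldl (fun d p => d.insert p.1 (d.getD p.1 0 + p.2))
      (PySem.Dict.counter a) = PySem.Dict.counter (a ++ b) := by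
  rw [pvMerge_items _ _
    (by simpa [PySem.Dict.keys] using PySem.Dict.nodup_keys_counter b)
    (PySem.Dict.nodup_keys_counter a)]
  apply PySem.Dict.ext
  show _ ++ _ = _
  have hmkb : PySem.Dict.mk (PySem.Dict.counter b).items = PySem.Dict.counter b := rfl
  rw [hmkb, PySem.Dict.items_counter a, PySem.Dict.items_counter b, PySem.Dict.items_counter (a ++ b), List.map_map,
    PySem.Set.ofList_append, PySem.Set.update_eq_append_filter, List.map_append]
  congr 1
  · apply List.map_congr_left
    intro k hk
    simp [PySem.Dict.getD_counter, List.count_append]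
  · rw [List.filter_map]
    have hfilt : (PySem.Set.ofList b).filter
          ((fun p => !(PySem.Dict.counter a).contains p.1) ∘ (fun k => (k, (b.count k : Int))))
        = (PySem.Set.ofList b).filter (fun y => !(PySem.Set.ofList a).contains y) := by
      apply List.filter_congr
      intro k hk
      simp [Function.comp, PySem.Dict.contains_counter, PySem.Set.contains_eq_listContains]
    rw [hfilt]
    apply List.map_congr_left
    intro k hk
    have hka : k ∉ a := by
      have := (List.mem_filter.mp hk).2
      simpa [PySem.Set.contains_eq_listContains] using this
    simp [List.count_append, List.count_eq_zero_of_not_mem hka]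

-- B's divide-and-conquer count is the Counter of the key list
theorem pvCount_eq_counter (ks : List String) : pvCount ks = PySem.Dict.counter ks := by
  induction ks using pvCount.induct with
  | case1 => rw [pvCount]; rfl
  | case2 k tail h _ =>
    have htail : tail = [] := by
      cases tail with
      | nil => rfl
      | cons a t => simp at h
    subst htail
    rw [pvCount, dif_pos (by simp)]
    apply PySem.Dict.ext
    rw [PySem.Dict.items_insert_of_not_contains _ _ (PySem.Dict.contains_empty k)]
    simp [PySem.Dict.items_counter, PySem.Set.ofList, PySem.Dict.empty]
  | case3 ks h mid ih1 ih2 =>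
    rw [pvCount]
    simp only [h, dite_false]
    show (pvCount (ks.drop mid)).items.foldl _ (pvCount (ks.take mid)) = _
    rw [ih1, ih2, pvMerge_counter, List.take_append_drop]

-- ===== VERDICT (by name: the statement is the Claim_ definition above) =====
theorem get_turn_counts_spec : Claim_equal_get_turn_counts := by
  intro samples _ _
  unfold Spec_get_turn_counts get_turn_counts get_turn_counts_alt
  have hkey : pvBKey = pvAKey := rfl
  rw [hkey, pvCount_eq_counter]
  have h1 : (fun (counts : PySem.Dict String Int) (turn : List (String × String)) =>
        let id := pvAKey turn
        if counts.contains id then counts.insert id (counts.getD id 0 + 1)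
        else counts.insert id 1)
      = (fun (d : PySem.Dict String Int) (t : List (String × String)) =>
          d.insert (pvAKey t) (d.getD (pvAKey t) 0 + 1)) := by
    funext d t
    exact pvStep_eq d (pvAKey t)
  have h2 : samples.foldl
      (fun (d : PySem.Dict String Int) t => d.insert (pvAKey t) (d.getD (pvAKey t) 0 + 1))
      PySem.Dict.empty
      = (samples.map pvAKey).foldl (fun d x => d.insert x (d.getD x 0 + 1)) PySem.Dict.empty :=
    (List.foldl_map (f := pvAKey) (g := fun (d : PySem.Dict String Int) x => d.insert x (d.getD x 0 + 1))
      (l := samples) (init := PySem.Dict.empty)).symm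
  rw [h1, h2, PySem.Dict.foldl_insert_getD_add_one_eq_counter]
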